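-- pv_equiv track=rewrite | github.com/leochlon/pythea | strawberry/src/strawberry/mcp_server.py | _map_cites_to_known_ids
-- ===== SOURCE A (Python) =====
-- from typing import Any, Dict, List, Optional, Tuple
--
-- def _map_cites_to_known_ids(cites: List[str], known: set) -> List[str]:
--     """
--     Best-effort mapping so numeric cites can match either:
--       - "12" (span id "12")
--       - "S12" (span id "S12")
--       - "S11" if caller uses 1-based in answer but spans are 0-based (common)
--     """
--     mapped: List[str] = []
--     for c in cites:
--         if c in known:
--             mapped.append(c)
--             continue
--
--         if c.isdigit():
--             n = int(c)
--             if f"S{n}" in known: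
--                 mapped.append(f"S{n}")
--                 continue
--             if n > 0 and f"S{n-1}" in known:
--                 mapped.append(f"S{n-1}")
--                 continue
--
--         if c.startswith("S") and c[1:].isdigit():
--             tail = c[1:]
--             if tail in known:
--                 mapped.append(tail)
--                 continue
--
--         mapped.append(c)
--
--     # de-dupe preserving order
--     seen = set()
--     out = []
--     for c in mapped:
--         if c not in seen:
--             out.append(c)
--             seen.add(c)
--     return out
-- ===== SOURCE B (Python) =====
-- def _resolve(c, known):
--     if c in known:
--         return c
--     if c.isdigit():
--         n = int(c)
--         for k in ((n, n - 1) if n > 0 else (n,)):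
--             if f"S{k}" in known:
--                 return f"S{k}"
--     elif c.startswith("S") and c[1:].isdigit() and c[1:] in known:
--         return c[1:]
--     return c
--
--
-- def _map_cites_to_known_ids(cites, known):
--     # Walk the cites BACKWARD, keeping resolved ids in an ordered dict and
--     # moving an id to the (current) end whenever it reappears earlier; reading
--     # the dict backwards then yields first occurrences in order - no seen set,
--     # no separate dedup pass.
--     d = {}
--     for c in reversed(cites):
--         r = _resolve(c, known)
--         d.pop(r, None)
--         d[r] = None
--     return list(reversed(d))
-- ===== Notes on version B (the rewrite author's own statement) =====
-- stated objective: alternative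
-- what changed: B fuses resolution and dedup into ONE backward pass: it walks the cites in reverse keeping resolved ids in an ordered dict with move-to-end on reappearance, then reads the dict backwards, replacing A's two staged forward passes (continue-cascade map, then seen-set dedup); resolution is factored into a helper whose numeric candidates are scanned as a loop.
import Mathlib
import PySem

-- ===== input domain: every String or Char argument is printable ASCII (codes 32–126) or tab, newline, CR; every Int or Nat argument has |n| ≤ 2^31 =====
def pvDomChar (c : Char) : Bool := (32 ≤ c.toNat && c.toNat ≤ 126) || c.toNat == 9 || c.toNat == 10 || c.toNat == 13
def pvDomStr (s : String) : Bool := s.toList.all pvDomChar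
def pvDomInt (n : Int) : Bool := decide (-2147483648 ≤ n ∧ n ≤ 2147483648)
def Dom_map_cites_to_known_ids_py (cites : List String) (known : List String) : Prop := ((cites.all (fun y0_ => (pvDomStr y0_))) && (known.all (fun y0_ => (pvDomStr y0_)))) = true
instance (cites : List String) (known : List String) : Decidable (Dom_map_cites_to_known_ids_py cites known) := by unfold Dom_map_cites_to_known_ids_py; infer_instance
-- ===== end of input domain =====

-- B fuses resolution and dedup into ONE backward pass: resolved ids go into an
-- ordered dict with move-to-end on reappearance, read backwards at the end — no
-- seen set, replacing A's two staged forward passes; objective: alternative.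


-- ===== PORT A =====
def map_cites_to_known_ids_py (cites : List String) (known : List String) : List String :=
  let mapped : List String := cites.foldl (fun mapped c =>
    if PySem.Set.contains known c then mapped ++ [c]
    else
      -- digit branch with its two 'continue's, as an optional result
      let dres : Option String :=
        if PySem.Str.strIsdigit c then
          let n : Int := (PySem.Int.ofStr? c).getD 0
          if PySem.Set.contains known ("S" ++ PySem.Int.toStr n) then
            some ("S" ++ PySem.Int.toStr n)
          else if decide (0 < n) && PySem.Set.contains known ("S" ++ PySem.Int.toStr (n - 1)) then
            some ("S" ++ PySem.Int.toStr (n - 1))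
          else none
        else none
      match dres with
      | some s => mapped ++ [s]
      | none =>
        if PySem.Str.startswith c "S" && PySem.Str.strIsdigit (PySem.Str.slice c (some 1) none) then
          let tail := PySem.Str.slice c (some 1) none
          if PySem.Set.contains known tail then mapped ++ [tail] else mapped ++ [c]
        else mapped ++ [c]) []
  -- de-dupe preserving order: out list + seen set
  (mapped.foldl (fun (st : List String × PySem.Set String) c =>
      if PySem.Set.contains st.2 c then st
      else (st.1 ++ [c], PySem.Set.add st.2 c)) ([], [])).1

-- ===== PORT B =====
-- _resolve from Source B: the early-return if/elif chain; the digit for-loop over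
-- (n, n-1) / (n,) with its first-match return is the find? below.
def pvResolve (c : String) (known : List String) : String :=
  if PySem.Set.contains known c then c
  else if PySem.Str.strIsdigit c then
    let n : Int := (PySem.Int.ofStr? c).getD 0
    let ks : List Int := if decide (0 < n) then [n, n - 1] else [n]
    match ks.find? (fun k => PySem.Set.contains known ("S" ++ PySem.Int.toStr k)) with
    | some k => "S" ++ PySem.Int.toStr k
    | none => c
  else if PySem.Str.startswith c "S"
       && PySem.Str.strIsdigit (PySem.Str.slice c (some 1) none)
       && PySem.Set.contains known (PySem.Str.slice c (some 1) none) then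
    PySem.Str.slice c (some 1) none
  else c

-- the backward fused pass: d.pop(r, None); d[r] = None over reversed(cites), then list(reversed(d))
def map_cites_to_known_ids_py_alt (cites : List String) (known : List String) : List String :=
  let d : PySem.Dict String (Option Unit) :=
    cites.reverse.foldl (fun d c =>
      let r := pvResolve c known
      PySem.Dict.insert (PySem.Dict.erase d r) r none) PySem.Dict.empty
  d.keys.reverse

-- ===== PRECONDITION & SPEC =====
def Spec_map_cites_to_known_ids_py (cites : List String) (known : List String) (out : List String) : Prop := out = map_cites_to_known_ids_py_alt cites known
instance (cites : List String) (known : List String) (out : List String) : Decidable (Spec_map_cites_to_known_ids_py cites known out) := by unfold Spec_map_cites_to_known_ids_py; infer_instance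

-- ===== CLAIM (what is proved, stated in full; the proofs are below) =====
def Claim_equal_map_cites_to_known_ids_py : Prop := ∀ (cites : List String) (known : List String), Dom_map_cites_to_known_ids_py cites known → Spec_map_cites_to_known_ids_py cites known (map_cites_to_known_ids_py cites known)

-- ===== LEMMAS AND PROOFS =====

-- a digit string cannot start with 'S'
theorem pv_isdigit_not_startswith (c : String) (h : PySem.Str.strIsdigit c = true) :
    PySem.Str.startswith c "S" = false := by
  simp only [PySem.Str.strIsdigit, PySem.Str.startswith] at *
  revert h
  cases h' : c.toList with
  | nil => simp [PySem.Chars.strIsdigit]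
  | cons a t =>
    simp [PySem.Chars.strIsdigit, PySem.Chars.startswith, PySem.Chars.isdigit, List.isPrefixOf]
    intro h1 h2 _ hS
    subst hS
    exact absurd h2 (by decide)

-- A's per-element cascade picks exactly the value of B's _resolve.
theorem pv_pick_eq (known : List String) (c : String) :
    (if PySem.Set.contains known c then c
     else
       let dres : Option String :=
         if PySem.Str.strIsdigit c then
           let n : Int := (PySem.Int.ofStr? c).getD 0
           if PySem.Set.contains known ("S" ++ PySem.Int.toStr n) then
             some ("S" ++ PySem.Int.toStr n)
           else if decide (0 < n) && PySem.Set.contains known ("S" ++ PySem.Int.toStr (n - 1)) then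
             some ("S" ++ PySem.Int.toStr (n - 1))
           else none
         else none
       match dres with
       | some s => s
       | none =>
         if PySem.Str.startswith c "S" && PySem.Str.strIsdigit (PySem.Str.slice c (some 1) none) then
           let tail := PySem.Str.slice c (some 1) none
           if PySem.Set.contains known tail then tail else c
         else c)
    = pvResolve c known := by
  unfold pvResolve
  by_cases hk : PySem.Set.contains known c
  · have hm : c ∈ known := (PySem.Set.contains_iff known c).mp hk
    simp [hm]
  · by_cases hd : PySem.Str.strIsdigit c
    · have hS := pv_isdigit_not_startswith c hd
      simp only [hk, hd, if_false, if_true, Bool.false_eq_true]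
      split_ifs with h1 h2 <;> simp_all [List.find?]
    · simp only [hk, hd, if_false, Bool.false_eq_true]
      split_ifs <;> simp_all

-- A's mapping loop equals mapping B's _resolve over the cites.
theorem pv_fold_eq_map (known : List String) (cites : List String) (acc : List String) :
    cites.foldl (fun mapped c =>
      if PySem.Set.contains known c then mapped ++ [c]
      else
        let dres : Option String :=
          if PySem.Str.strIsdigit c then
            let n : Int := (PySem.Int.ofStr? c).getD 0
            if PySem.Set.contains known ("S" ++ PySem.Int.toStr n) then
              some ("S" ++ PySem.Int.toStr n)
            else if decide (0 < n) && PySem.Set.contains known ("S" ++ PySem.Int.toStr (n - 1)) then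
              some ("S" ++ PySem.Int.toStr (n - 1))
            else none
          else none
        match dres with
        | some s => mapped ++ [s]
        | none =>
          if PySem.Str.startswith c "S" && PySem.Str.strIsdigit (PySem.Str.slice c (some 1) none) then
            let tail := PySem.Str.slice c (some 1) none
            if PySem.Set.contains known tail then mapped ++ [tail] else mapped ++ [c]
          else mapped ++ [c]) acc
    = acc ++ cites.map (fun c => pvResolve c known) := by
  induction cites generalizing acc with
  | nil => simp
  | cons c cs ih =>
    have h := pv_pick_eq known c
    simp only [List.foldl_cons, List.map_cons]
    rw [show ∀ (z : String), acc ++ z :: (cs.map (fun c => pvResolve c known))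
        = (acc ++ [z]) ++ cs.map (fun c => pvResolve c known) from
        fun z => (List.append_assoc acc [z] _).symm]
    rw [← ih]
    congr 1
    rw [← h]
    dsimp only
    split
    · rfl
    · split
      · rfl
      · split
        · split <;> rfl
        · rfl

-- A's seen-set dedup loop is first-occurrence dedup (PySem.Set.ofList).
theorem pv_dedup_loop (xs : List String) (s : List String) :
    (xs.foldl (fun (st : List String × PySem.Set String) c =>
        if PySem.Set.contains st.2 c then st
        else (st.1 ++ [c], PySem.Set.add st.2 c)) (s, s)).1
    = xs.foldl PySem.Set.add s := by
  induction xs generalizing s with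
  | nil => rfl
  | cons c cs ih =>
    simp only [List.foldl_cons]
    by_cases hm : c ∈ s
    · have hc : PySem.Set.contains s c = true := by simpa [PySem.Set.contains_iff] using hm
      have ha : PySem.Set.add s c = s := by simp [PySem.Set.add, hm]
      simpa [hm, hc, ha] using ih s
    · have hc : ¬ PySem.Set.contains s c = true := by simpa [PySem.Set.contains_iff] using hm
      have ha : PySem.Set.add s c = s ++ [c] := by simp [PySem.Set.add, hm]
      simpa [hm, hc, ha] using ih (s ++ [c])

-- erase drops exactly the matching keys
theorem pv_keys_erase {κ ν : Type} [BEq κ] (d : PySem.Dict κ ν) (k : κ) :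
    (PySem.Dict.erase d k).keys = d.keys.filter (fun x => !(x == k)) := by
  cases d with | mk l =>
    simp only [PySem.Dict.erase, PySem.Dict.keys]
    rw [List.filter_map]
    simp only [Function.comp_def]

-- after erasing k, the dict no longer contains k
theorem pv_contains_erase_self {κ ν : Type} [BEq κ] [LawfulBEq κ]
    (d : PySem.Dict κ ν) (k : κ) : (PySem.Dict.erase d k).contains k = false := by
  cases d with | mk l =>
    simp [PySem.Dict.erase, PySem.Dict.contains, List.any_filter]

-- B's backward move-to-front dict pass, read backwards, IS first-occurrence dedup.
theorem pv_rev_fold_eq_ofList (ys : List String) :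
    ((ys.reverse.foldl (fun d r =>
        PySem.Dict.insert (PySem.Dict.erase d r) r (none : Option Unit))
      PySem.Dict.empty).keys).reverse
    = PySem.Set.ofList ys := by
  rw [List.foldl_reverse]
  induction ys with
  | nil => rfl
  | cons r t ih =>
    simp only [List.foldr_cons]
    rw [PySem.Dict.keys_insert_of_not_contains (h := pv_contains_erase_self _ r)]
    rw [pv_keys_erase]
    rw [List.reverse_append]
    rw [← List.filter_reverse, ih]
    simp [PySem.Set.ofList_cons, PySem.Set.discard]

-- ===== VERDICT (by name: the statement is the Claim_ definition above) =====
theorem map_cites_to_known_ids_py_spec : Claim_equal_map_cites_to_known_ids_py := by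
  intro cites known _
  show map_cites_to_known_ids_py cites known = map_cites_to_known_ids_py_alt cites known
  unfold map_cites_to_known_ids_py map_cites_to_known_ids_py_alt
  rw [pv_fold_eq_map known cites []]
  simp only [List.nil_append]
  rw [pv_dedup_loop _ []]
  rw [← List.foldl_map (f := fun c => pvResolve c known)
        (g := fun (d : PySem.Dict String (Option Unit)) (r : String) =>
          PySem.Dict.insert (PySem.Dict.erase d r) r none)]
  rw [List.map_reverse]
  rw [pv_rev_fold_eq_ofList]
  rw [← PySem.Set.ofList_eq_foldl]
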